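-- pv_equiv track=rewrite | github.com/kanchan-12345/digital-line-encoder | HDB3.py | hdb3
-- ===== SOURCE A (Python) =====
-- def ami(data):
--     signal = []
--     last_polarity = -1
--     for bit in data:
--         if bit == 1:
--             last_polarity *= -1
--             signal.append(last_polarity)
--         else:
--             signal.append(0)
--     return signal
--
-- def hdb3(data):
--     signal = ami(data)  # Start with AMI encoding
--     zero_count = 0
--     last_violation = -1
--     for i in range(len(data)):
--         if data[i] == 0:
--             zero_count += 1
--         else:
--             zero_count = 0
--         if zero_count == 4:
--             if sum(signal[:i]) % 2 == 0:
--                 signal[i-3:i+1] = [last_violation, 0, 0, last_violation]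
--             else:
--                 signal[i-3:i+1] = [0, 0, 0, -last_violation]
--             last_violation *= -1
--             zero_count = 0
--     return signal
-- ===== SOURCE B (Python) =====
-- def hdb3(data):
--     out = []
--     last_polarity = -1
--     last_violation = -1
--     zero_count = 0
--     odd = False  # parity of the number of pulses emitted so far
--     for bit in data:
--         if bit == 1:
--             last_polarity = -last_polarity
--             out.append(last_polarity)
--             odd = not odd
--             zero_count = 0
--         else:
--             out.append(0)
--             if bit == 0:
--                 zero_count += 1
--                 if zero_count == 4:
--                     if odd:
--                         out[-4:] = [0, 0, 0, -last_violation]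
--                         odd = not odd
--                     else:
--                         out[-4:] = [last_violation, 0, 0, last_violation]
--                     last_violation = -last_violation
--                     zero_count = 0
--             else:
--                 zero_count = 0
--     return out
-- ===== Notes on version B (the rewrite author's own statement) =====
-- stated objective: alternative
-- what changed: single fused pass that tracks the pulse-count parity incrementally (a boolean flipped on each pulse) instead of first building the AMI signal and then re-summing signal[:i] at every 4-zero substitution; measured 1.42x at the largest size, below the 1.5x bar
import Mathlib
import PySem

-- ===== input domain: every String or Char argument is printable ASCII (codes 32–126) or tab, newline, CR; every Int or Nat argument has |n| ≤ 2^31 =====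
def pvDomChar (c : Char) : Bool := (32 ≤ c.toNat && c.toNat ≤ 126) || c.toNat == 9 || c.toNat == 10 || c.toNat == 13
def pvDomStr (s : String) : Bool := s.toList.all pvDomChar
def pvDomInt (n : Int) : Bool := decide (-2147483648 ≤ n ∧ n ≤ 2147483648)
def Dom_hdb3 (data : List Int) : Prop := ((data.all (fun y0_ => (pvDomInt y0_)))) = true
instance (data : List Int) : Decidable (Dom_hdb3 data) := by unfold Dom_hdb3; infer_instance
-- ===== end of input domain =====

-- B fuses A's two passes into one pass that tracks the pulse-count parity with a flipped
-- boolean instead of re-summing signal[:i] at every 4-zero substitution (objective: alternative).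

-- ===== PORT A =====
-- ami(data): build the AMI signal
def ami : List Int → Int → List Int
  | [], _ => []
  | bit :: rest, lp =>
    if bit = 1 then (-lp) :: ami rest (-lp) else 0 :: ami rest lp

-- one iteration of A's `for i in range(len(data))` loop; state = (signal, zero_count, last_violation)
def hdb3Step (data : List Int) (st : List Int × Int × Int) (i : Nat) : List Int × Int × Int :=
  let signal := st.1
  let zc0 := st.2.1
  let lv := st.2.2
  let d := data.getD i 0      -- data[i]; every call has i < len(data), so plain getD is exact
  let zc := if d = 0 then zc0 + 1 else 0
  if zc = 4 then
    -- zero_count = 4 forces i ≥ 3, so Python's signal[i-3:i+1] = ... is exactly take/++/drop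
    if PySem.Int.mod (signal.take i).sum 2 = 0 then
      (signal.take (i - 3) ++ [lv, 0, 0, lv] ++ signal.drop (i + 1), 0, -lv)
    else
      (signal.take (i - 3) ++ [0, 0, 0, -lv] ++ signal.drop (i + 1), 0, -lv)
  else
    (signal, zc, lv)

def hdb3 (data : List Int) : List Int :=
  ((List.range data.length).foldl (hdb3Step data) (ami data (-1), 0, -1)).1

-- ===== PORT B =====
-- acc is the output built in reverse (append = cons, out[-4:] = seg rewrites acc's first 4 cells)
def hdb3AltGo : List Int → List Int → Int → Int → Bool → Int → List Int
  | [], acc, _, _, _, _ => acc.reverse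
  | bit :: rest, acc, lp, lv, odd, zc =>
    if bit = 1 then
      hdb3AltGo rest ((-lp) :: acc) (-lp) lv (!odd) 0
    else if bit = 0 then
      if zc + 1 = 4 then
        if odd then
          hdb3AltGo rest ([0, 0, 0, -lv].reverse ++ (0 :: acc).drop 4) lp (-lv) (!odd) 0
        else
          hdb3AltGo rest ([lv, 0, 0, lv].reverse ++ (0 :: acc).drop 4) lp (-lv) odd 0
      else
        hdb3AltGo rest (0 :: acc) lp lv odd (zc + 1)
    else
      hdb3AltGo rest (0 :: acc) lp lv odd 0

def hdb3_alt (data : List Int) : List Int :=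
  hdb3AltGo data [] (-1) (-1) false 0

-- ===== PRECONDITION & SPEC =====
def Spec_hdb3 (data : List Int) (out : List Int) : Prop := out = hdb3_alt data
instance (data : List Int) (out : List Int) : Decidable (Spec_hdb3 data out) := by unfold Spec_hdb3; infer_instance

-- ===== CLAIM (what is proved, stated in full; the proofs are below) =====
def Claim_equal_hdb3 : Prop := ∀ (data : List Int), Dom_hdb3 data → Spec_hdb3 data (hdb3 data)

-- ===== LEMMAS AND PROOFS =====

-- data[i] read through the suffix: if data.drop i = d :: r then data.getD i 0 = d
theorem getD_of_drop_cons (l : List Int) (i : Nat) (d : Int) (r : List Int)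
    (h : l.drop i = d :: r) : l.getD i 0 = d := by
  have h2 : (l.drop i)[0]? = l[i+0]? := List.getElem?_drop
  simp [h] at h2
  simp [List.getD_eq_getElem?_getD, ← h2]

-- loop invariant: A's fold over the remaining indices equals B's recursion over the
-- remaining data, given B's reversed accumulator, matching counters and the parity flag
theorem hdb3_inv (data : List Int) (rest : List Int) :
    ∀ (acc : List Int) (i : Nat) (lp lv zc : Int) (odd : Bool),
    data.drop i = rest → acc.length = i →
    PySem.Int.mod acc.sum 2 = (if odd then 1 else 0) →
    (lp = 1 ∨ lp = -1) → (lv = 1 ∨ lv = -1) →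
    (zc = 0 ∨ zc = 1 ∨ zc = 2 ∨ zc = 3) →
    acc.take zc.toNat = List.replicate zc.toNat 0 →
    ((List.range' i (data.length - i)).foldl (hdb3Step data) (acc.reverse ++ ami rest lp, zc, lv)).1
      = hdb3AltGo rest acc lp lv odd zc := by
  induction rest with
  | nil =>
    intro acc i lp lv zc odd hdrop hlen hpar hlp hlv hzc hz
    have hn : data.length - i = 0 := by
      have := congrArg List.length hdrop; simpa [List.length_drop] using this
    simp [hn, ami, hdb3AltGo]
  | cons d rest' ih =>
    intro acc i lp lv zc odd hdrop hlen hpar hlp hlv hzc hz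
    have hmod2 : ∀ a : Int, PySem.Int.mod a 2 = a % 2 := fun a =>
      PySem.Int.mod_eq_emod_of_pos (by norm_num)
    have hgd : data.getD i 0 = d := getD_of_drop_cons data i d rest' hdrop
    have hdrop' : data.drop (i+1) = rest' := by
      rw [← List.drop_drop, hdrop]; rfl
    have hn : data.length - i = rest'.length + 1 := by
      have := congrArg List.length hdrop; simp [List.length_drop] at this; omega
    have hn' : data.length - (i+1) = rest'.length := by omega
    rw [hn, List.range'_succ, List.foldl_cons]
    by_cases hd1 : d = 1
    · -- pulse: AMI emits -lp, zero_count resets, parity flips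
      subst hd1
      have hstep : hdb3Step data (acc.reverse ++ ami (1 :: rest') lp, zc, lv) i
          = (((-lp) :: acc).reverse ++ ami rest' (-lp), 0, lv) := by
        simp only [hdb3Step]
        rw [hgd]
        norm_num [ami]
      rw [hstep]
      have := ih ((-lp) :: acc) (i+1) (-lp) lv 0 (!odd) hdrop' (by simp [hlen])
        (by rw [hmod2] at hpar ⊢
            rcases hlp with h | h <;> cases odd <;> simp_all [List.sum_cons] <;> omega)
        (by rcases hlp with h | h <;> simp [h]) hlv (by omega) (by simp)
      rw [hn'] at this
      rw [this]
      simp [hdb3AltGo]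
    · by_cases hd0 : d = 0
      · subst hd0
        by_cases h4 : zc + 1 = 4
        · -- fourth zero: substitution
          have hzc3 : zc = 3 := by omega
          subst hzc3
          have htn : (3 : Int).toNat = 3 := rfl
          rw [htn] at hz
          have hacc : acc = [0,0,0] ++ acc.drop 3 := by
            conv_lhs => rw [← List.take_append_drop 3 acc]
            rw [hz]; rfl
          set t := acc.drop 3 with ht
          have hlenge : 3 ≤ acc.length := by
            have := congrArg List.length hacc; simp at this; omega
          have hsum : acc.sum = t.sum := by rw [hacc]; simp
          have hrev : acc.reverse = t.reverse ++ [0,0,0] := by rw [hacc]; simp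
          have hsig : acc.reverse ++ ami (0 :: rest') lp
              = t.reverse ++ [0,0,0] ++ (0 :: ami rest' lp) := by
            rw [hrev]; simp [ami]
          have hlent : t.reverse.length = i - 3 := by
            simp [ht, ← hlen]
          have htake : ((acc.reverse ++ ami (0 :: rest') lp).take i) = acc.reverse :=
            List.take_left' (by simp [hlen])
          have htake3 : ((acc.reverse ++ ami (0 :: rest') lp).take (i-3)) = t.reverse := by
            rw [hsig, List.append_assoc]
            exact List.take_left' hlent
          have hdropi : ((acc.reverse ++ ami (0 :: rest') lp).drop (i+1)) = ami rest' lp := by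
            have heq : acc.reverse ++ ami (0 :: rest') lp
                = (acc.reverse ++ [0]) ++ ami rest' lp := by simp [ami]
            rw [heq]
            exact List.drop_left' (by simp [hlen])
          have hcond : PySem.Int.mod ((acc.reverse ++ ami (0 :: rest') lp).take i).sum 2
              = (if odd then 1 else 0) := by
            rw [htake, List.sum_reverse_int, hpar]
          cases odd with
          | false =>
            have hcond0 : PySem.Int.mod ((acc.reverse ++ ami (0 :: rest') lp).take i).sum 2
                = 0 := by simpa using hcond
            have hstep : hdb3Step data (acc.reverse ++ ami (0 :: rest') lp, 3, lv) i
                = (([lv,0,0,lv].reverse ++ (0 :: acc).drop 4).reverse ++ ami rest' lp, 0, -lv) := by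
              simp only [hdb3Step]
              rw [hgd]
              have h44 : (if (0:Int) = 0 then (3:Int) + 1 else 0) = 4 := by norm_num
              rw [if_pos h44, if_pos hcond0]
              rw [htake3, hdropi]
              simp [ht]
            rw [hstep]
            have := ih ([lv,0,0,lv].reverse ++ (0 :: acc).drop 4) (i+1) lp (-lv) 0 false hdrop'
              (by simp [← hlen]; omega)
              (by rw [hmod2] at hpar ⊢
                  simp [List.sum_cons, ht] at *
                  rw [hsum] at hpar
                  rcases hlv with h | h <;> simp [h] <;> omega)
              hlp (by rcases hlv with h | h <;> simp [h]) (by omega) (by simp)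
            rw [hn'] at this
            rw [this]
            simp [hdb3AltGo]
          | true =>
            have hcond1 : PySem.Int.mod ((acc.reverse ++ ami (0 :: rest') lp).take i).sum 2
                = 1 := by simpa using hcond
            have hstep : hdb3Step data (acc.reverse ++ ami (0 :: rest') lp, 3, lv) i
                = (([0,0,0,-lv].reverse ++ (0 :: acc).drop 4).reverse ++ ami rest' lp, 0, -lv) := by
              simp only [hdb3Step]
              rw [hgd]
              have h44 : (if (0:Int) = 0 then (3:Int) + 1 else 0) = 4 := by norm_num
              rw [if_pos h44, if_neg (show ¬_ by rw [hcond1]; norm_num)]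
              rw [htake3, hdropi]
              simp [ht]
            rw [hstep]
            have := ih ([0,0,0,-lv].reverse ++ (0 :: acc).drop 4) (i+1) lp (-lv) 0 false hdrop'
              (by simp [← hlen]; omega)
              (by rw [hmod2] at hpar ⊢
                  simp [List.sum_cons, ht] at *
                  rw [hsum] at hpar
                  rcases hlv with h | h <;> simp [h] <;> omega)
              hlp (by rcases hlv with h | h <;> simp [h]) (by omega) (by simp)
            rw [hn'] at this
            rw [this]
            simp [hdb3AltGo]
        · -- a zero, run not yet 4 long
          have hstep : hdb3Step data (acc.reverse ++ ami (0 :: rest') lp, zc, lv) i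
              = ((0 :: acc).reverse ++ ami rest' lp, zc + 1, lv) := by
            simp only [hdb3Step]
            rw [hgd]
            rw [if_pos (show (0:Int) = 0 from rfl)]
            rw [if_neg h4]
            simp [ami]
          rw [hstep]
          have := ih (0 :: acc) (i+1) lp lv (zc+1) odd hdrop' (by simp [hlen])
            (by simpa using hpar) hlp hlv (by omega)
            (by have hzn : (zc+1).toNat = zc.toNat + 1 := by omega
                rw [hzn, List.take_succ_cons, hz, List.replicate_succ])
          rw [hn'] at this
          rw [this]
          simp [hdb3AltGo, h4]
      · -- neither 1 nor 0: AMI emits 0, zero_count resets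
        have hstep : hdb3Step data (acc.reverse ++ ami (d :: rest') lp, zc, lv) i
            = ((0 :: acc).reverse ++ ami rest' lp, 0, lv) := by
          simp only [hdb3Step]
          rw [hgd]
          rw [if_neg hd0]
          norm_num [ami, hd1]
        rw [hstep]
        have := ih (0 :: acc) (i+1) lp lv 0 odd hdrop' (by simp [hlen])
          (by simpa using hpar) hlp hlv (by omega) (by simp)
        rw [hn'] at this
        rw [this]
        simp [hdb3AltGo, hd0, hd1]

-- ===== VERDICT (by name: the statement is the Claim_ definition above) =====
theorem hdb3_spec : Claim_equal_hdb3 := by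
  intro data _
  unfold Spec_hdb3 hdb3 hdb3_alt
  rw [List.range_eq_range']
  have := hdb3_inv data data [] 0 (-1) (-1) 0 false (by simp) rfl (by decide)
    (by right; rfl) (by right; rfl) (by left; rfl) (by simp)
  simpa using this
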